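-- pv_equiv track=rewrite | github.com/igemsoftware/USTC-Software2015 | backend/BioBLESS/biocircuit/biocircuit.py | string2truthtable
-- ===== SOURCE A (Python) =====
-- def string2truthtable(string):
--     """Convert string to truthtable which qm can recognize.
--
--     Parameters
--     ----------
--     string : string
--         A string of zeros and ones representing a truthtable.
--
--     Returns
--     -------
--     ones : list
--         Iterable of integer minterms.
--
--     zeros : list
--         Iterable of integer maxterms.
--
--     dc : list
--         Iterable of integers specifying don't-care terms
--
--     Examples
--     --------
--     A truthtable:
--     |---+---+---+-----|------+-------+----|
--     | A | B | C | out | ones | zeros | dc |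
--     |---+---+---+-----|------+-------+----|
--     | 0 | 0 | 0 |  1  |  0   |       |    |
--     | 0 | 0 | 1 |  0  |      |   1   |    |
--     | 0 | 1 | 0 |  1  |  2   |       |    |
--     | 0 | 1 | 1 |  1  |  3   |       |    |
--     | 1 | 0 | 0 |  0  |      |   4   |    |
--     | 1 | 0 | 1 |  1  |  5   |       |    |
--     | 1 | 1 | 0 |  0  |      |   6   |    |
--     | 1 | 1 | 1 |  -  |      |       | 7  |
--     |---+---+---+-----|------+-------+----|
--     string = '1011010-'
--     ones = [0, 2, 3, 5]
--     zeros = [1, 4, 6]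
--     dc = [7]
--     """
--     ones = []
--     zeros = []
--     dc = []
--     for i in range(len(string)):
--         if string[i] == '1':
--             ones.append(i)
--         elif string[i] == '0':
--             zeros.append(i)
--         else:
--             dc.append(i)
--     return ones, zeros, dc
-- ===== SOURCE B (Python) =====
-- def string2truthtable(string):
--     ones = [i for i, c in enumerate(string) if c == '1']
--     zeros = [i for i, c in enumerate(string) if c == '0']
--     dc = [i for i, c in enumerate(string) if c != '0' and c != '1']
--     return ones, zeros, dc
-- ===== Notes on version B (the rewrite author's own statement) =====
-- stated objective: idiomatic
-- what changed: Replaced the single index loop with three conditional appends by three independent filtered enumerate comprehensions, one per output list.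
import Mathlib
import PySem

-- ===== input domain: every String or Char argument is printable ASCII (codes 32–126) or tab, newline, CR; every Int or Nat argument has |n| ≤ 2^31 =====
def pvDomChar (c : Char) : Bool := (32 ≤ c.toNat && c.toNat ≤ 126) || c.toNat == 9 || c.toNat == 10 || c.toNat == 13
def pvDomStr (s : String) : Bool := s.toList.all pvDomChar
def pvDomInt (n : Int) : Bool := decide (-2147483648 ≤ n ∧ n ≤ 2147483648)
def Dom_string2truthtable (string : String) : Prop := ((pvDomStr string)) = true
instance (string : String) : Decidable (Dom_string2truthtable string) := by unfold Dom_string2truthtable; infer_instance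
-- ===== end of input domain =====

-- B changes A's single classifying index loop into three independent filtered
-- enumerate passes (one per output list); same output, objective: idiomatic.

-- ===== PORT A =====
-- single loop over range(len(string)), classifying string[i] and appending i
def string2truthtable (string : String) : List Int × List Int × List Int :=
  (PySem.List.pyRange 0 (PySem.Str.len string) 1).foldl
    (fun (acc : List Int × List Int × List Int) i =>
      match PySem.Str.pyGet? string i with
      | some c =>
        if c = '1' then (acc.1 ++ [i], acc.2.1, acc.2.2)
        else if c = '0' then (acc.1, acc.2.1 ++ [i], acc.2.2)
        else (acc.1, acc.2.1, acc.2.2 ++ [i])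
      | none => acc)   -- unreachable: every i in range(len) is in bounds
    ([], [], [])

-- ===== PORT B =====
-- three filtered enumerate comprehensions, one per list
def string2truthtable_alt (string : String) : List Int × List Int × List Int :=
  let e := PySem.List.enumerate string.toList 0
  (((e.filter (fun p => p.2 = '1')).map (·.1)),
   ((e.filter (fun p => p.2 = '0')).map (·.1)),
   ((e.filter (fun p => p.2 ≠ '0' ∧ p.2 ≠ '1')).map (·.1)))

-- ===== PRECONDITION & SPEC =====
def Spec_string2truthtable (string : String) (out : List Int × List Int × List Int) : Prop := out = string2truthtable_alt string
instance (string : String) (out : List Int × List Int × List Int) : Decidable (Spec_string2truthtable string out) := by unfold Spec_string2truthtable; infer_instance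

-- ===== CLAIM (what is proved, stated in full; the proofs are below) =====
def Claim_equal_string2truthtable : Prop := ∀ (string : String), Dom_string2truthtable string → Spec_string2truthtable string (string2truthtable string)

-- ===== LEMMAS AND PROOFS =====

-- B's value on a character list, starting enumeration at 0 (proof-side helper)
def pvAltOf (cs : List Char) : List Int × List Int × List Int :=
  let e := PySem.List.enumerate cs 0
  (((e.filter (fun p => p.2 = '1')).map (·.1)),
   ((e.filter (fun p => p.2 = '0')).map (·.1)),
   ((e.filter (fun p => p.2 ≠ '0' ∧ p.2 ≠ '1')).map (·.1)))

-- loop invariant: after the first m iterations, A's accumulator is B's value on the first m characters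
lemma pvLoopA_eq (l : List Char) (m : Nat) (hm : m ≤ l.length) :
    (PySem.List.pyRange 0 (m : Int) 1).foldl
      (fun (acc : List Int × List Int × List Int) i =>
        match PySem.List.pyGet? l i with
        | some c =>
          if c = '1' then (acc.1 ++ [i], acc.2.1, acc.2.2)
          else if c = '0' then (acc.1, acc.2.1 ++ [i], acc.2.2)
          else (acc.1, acc.2.1, acc.2.2 ++ [i])
        | none => acc)
      ([], [], [])
    = pvAltOf (l.take m) := by
  induction m with
  | zero => simp [pvAltOf]
  | succ m ih =>
    have hm' : m ≤ l.length := Nat.le_of_succ_le hm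
    have hlt : m < l.length := hm
    have hsplit : (PySem.List.pyRange 0 ((m + 1 : Nat) : Int) 1)
        = PySem.List.pyRange 0 (m : Int) 1 ++ [(m : Int)] := by
      push_cast
      exact PySem.List.pyRange_one_succ_right (by positivity)
    rw [hsplit, List.foldl_append, ih hm']
    have htake : l.take (m + 1) = l.take m ++ [l[m]] := by
      rw [List.take_add_one, List.getElem?_eq_getElem hlt]; rfl
    have hget : PySem.List.pyGet? l ((m : Nat) : Int) = some l[m] := by
      rw [PySem.List.pyGet?_natCast]
      simp [List.getElem?_eq_getElem hlt]
    simp only [List.foldl_cons, List.foldl_nil, hget]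
    simp only [pvAltOf, htake, PySem.List.enumerate_append, List.filter_append,
      List.map_append, PySem.List.enumerate_cons, PySem.List.enumerate_nil,
      List.length_take, Nat.min_eq_left hm']
    by_cases h1 : l[m] = '1'
    · simp [h1]
    · by_cases h0 : l[m] = '0'
      · simp [h0]
      · simp [h0, h1]

-- ===== VERDICT (by name: the statement is the Claim_ definition above) =====
theorem string2truthtable_spec : Claim_equal_string2truthtable := by
  intro s _
  show string2truthtable s = string2truthtable_alt s
  have : string2truthtable_alt s = pvAltOf s.toList := rfl
  rw [this]
  have := pvLoopA_eq s.toList s.toList.length (le_refl _)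
  rw [List.take_length] at this
  rw [← this]
  simp [string2truthtable, PySem.Str.len_eq]
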